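-- pv_equiv track=rewrite | github.com/smithk86/sarcasticase | sarcasticase.py | sarcasticase
-- ===== SOURCE A (Python) =====
-- def sarcasticase(text: str) -> str:
--     _index = 0
--     _text = ""
--     for _char in text:
--         # do not incriment the index number for a space
--         if _char == " ":
--             _text += " "
--         else:
--             _mod = _index % 2
--             _index += 1
--             _text += _char.upper() if _mod == 1 else _char.lower()
--     return _text
-- ===== SOURCE B (Python) =====
-- def sarcasticase(text: str) -> str:
--     # filter-then-reassemble: case the non-space chars by position, then stitch spaces back in
--     letters = [c for c in text if c != ' ']
--     cased = [c.upper() if i % 2 else c.lower() for i, c in enumerate(letters)]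
--     it = iter(cased)
--     return ''.join(' ' if c == ' ' else next(it) for c in text)
-- ===== Notes on version B (the rewrite author's own statement) =====
-- stated objective: alternative
-- what changed: Replaces A's single fused loop with a mutable skip counter by a filter-then-reassemble decomposition: extract non-space characters, case them by enumerate parity, then stitch them back past the spaces in a second pass.
import Mathlib
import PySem

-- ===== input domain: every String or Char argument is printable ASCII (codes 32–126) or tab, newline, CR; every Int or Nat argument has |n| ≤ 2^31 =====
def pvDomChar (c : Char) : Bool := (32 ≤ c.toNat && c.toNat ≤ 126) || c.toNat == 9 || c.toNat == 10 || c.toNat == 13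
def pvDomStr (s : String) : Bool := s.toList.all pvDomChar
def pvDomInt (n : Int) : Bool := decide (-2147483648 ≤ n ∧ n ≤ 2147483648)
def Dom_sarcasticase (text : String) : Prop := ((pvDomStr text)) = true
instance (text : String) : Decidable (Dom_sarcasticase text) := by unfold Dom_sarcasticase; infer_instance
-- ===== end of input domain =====

-- B replaces A's fused skip-counter loop by a filter/case/stitch decomposition; same cost, proved equal.

-- ===== PORT A =====
-- A's single loop: state = (_index, _text), space appended without touching the index
def sarcLoopA : List Char → Int → List Char → List Char
  | [], _, acc => acc
  | c :: rest, idx, acc =>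
    if c = ' ' then
      sarcLoopA rest idx (acc ++ [' '])
    else
      sarcLoopA rest (idx + 1)
        (acc ++ [if idx % 2 == 1 then PySem.Chars.upperChar c else PySem.Chars.lowerChar c])

def sarcasticase (text : String) : String :=
  String.mk (sarcLoopA text.toList 0 [])

-- ===== PORT B =====
-- stitch: second pass over the original text, consuming the cased letters where the char is not a space
def sarcStitch : List Char → List Char → List Char
  | [], _ => []
  | c :: rest, cs =>
    if c = ' ' then ' ' :: sarcStitch rest cs
    else
      match cs with
      | [] => []          -- unreachable: cased has one entry per non-space char
      | d :: ds => d :: sarcStitch rest ds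

def sarcasticase_alt (text : String) : String :=
  String.mk (sarcStitch text.toList
    ((PySem.List.enumerate (text.toList.filter (fun c => c ≠ ' ')) 0).map
      (fun p => if p.1 % 2 == 1 then PySem.Chars.upperChar p.2 else PySem.Chars.lowerChar p.2)))

-- ===== PRECONDITION & SPEC =====
def Spec_sarcasticase (text : String) (out : String) : Prop := out = sarcasticase_alt text
instance (text : String) (out : String) : Decidable (Spec_sarcasticase text out) := by unfold Spec_sarcasticase; infer_instance

-- ===== CLAIM (what is proved, stated in full; the proofs are below) =====
def Claim_equal_sarcasticase : Prop := ∀ (text : String), Dom_sarcasticase text → Spec_sarcasticase text (sarcasticase text)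

-- ===== LEMMAS AND PROOFS =====

-- proof-side view of B's cased list: case letters one by one from index k
def casedFrom : List Char → Int → List Char
  | [], _ => []
  | c :: cs, k =>
    (if k % 2 == 1 then PySem.Chars.upperChar c else PySem.Chars.lowerChar c) :: casedFrom cs (k + 1)

theorem map_enumerate_eq_casedFrom (l : List Char) (k : Int) :
    (PySem.List.enumerate l k).map
      (fun p => if p.1 % 2 == 1 then PySem.Chars.upperChar p.2 else PySem.Chars.lowerChar p.2)
      = casedFrom l k := by
  induction l generalizing k with
  | nil => simp [casedFrom, PySem.List.enumerate_nil]
  | cons c cs ih => rw [PySem.List.enumerate_cons, List.map_cons, casedFrom, ih]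

theorem sarcLoopA_eq_stitch (l : List Char) (k : Int) (acc : List Char) :
    sarcLoopA l k acc = acc ++ sarcStitch l (casedFrom (l.filter (fun c => c ≠ ' ')) k) := by
  induction l generalizing k acc with
  | nil => simp [sarcLoopA, sarcStitch]
  | cons c cs ih =>
    by_cases h : c = ' '
    · subst h
      simp [sarcLoopA, sarcStitch, ih, List.append_assoc]
    · simp [sarcLoopA, sarcStitch, h, casedFrom, ih, List.append_assoc]

-- ===== VERDICT (by name: the statement is the Claim_ definition above) =====
theorem sarcasticase_spec : Claim_equal_sarcasticase := by
  intro text _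
  show sarcasticase text = sarcasticase_alt text
  unfold sarcasticase sarcasticase_alt
  rw [map_enumerate_eq_casedFrom, sarcLoopA_eq_stitch, List.nil_append]
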